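-- pv_equiv track=rewrite | github.com/goks-98/job-scanner | src/resume/optimizer.py | _optimize_skills
-- ===== SOURCE A (Python) =====
-- from typing import List, Dict, Set, Any, Tuple
--
-- def _optimize_skills(skills: Dict[str, List[str]], keywords: Set[str]) -> Dict[str, List[str]]:
--     """Optimize and reorder skills based on job keywords."""
--     optimized = {'technical': [], 'tools': [], 'soft_skills': []}
--
--     all_skills = []
--     for category, skill_list in skills.items():
--         all_skills.extend(skill_list)
--
--     # Score and sort skills by relevance to job
--     scored_skills = []
--     for skill in all_skills:
--         score = 0
--         skill_lower = skill.lower()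
--         for kw in keywords:
--             if kw in skill_lower or skill_lower in kw:
--                 score += 1
--         scored_skills.append((skill, score))
--
--     # Sort by score (matching keywords first)
--     scored_skills.sort(key=lambda x: x[1], reverse=True)
--
--     # Categorize
--     for skill, _ in scored_skills:
--         skill_lower = skill.lower()
--         if any(term in skill_lower for term in ['python', 'sql', 'scala', 'java', 'spark']):
--             optimized['technical'].append(skill)
--         elif any(term in skill_lower for term in ['team', 'communication', 'agile', 'collaboration']):
--             optimized['soft_skills'].append(skill)
--         else:
--             optimized['tools'].append(skill)
--
--     return optimized
-- ===== SOURCE B (Python) =====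
-- def _optimize_skills(skills, keywords):
--     """Optimize and reorder skills based on job keywords (fused score+categorize, then per-bucket sorts)."""
--     tech_terms = ('python', 'sql', 'scala', 'java', 'spark')
--     soft_terms = ('team', 'communication', 'agile', 'collaboration')
--     technical, soft_skills, tools = [], [], []
--     for skill_list in skills.values():
--         for skill in skill_list:
--             sl = skill.lower()
--             score = sum(1 for kw in keywords if kw in sl or sl in kw)
--             if any(t in sl for t in tech_terms):
--                 technical.append((skill, score))
--             elif any(t in sl for t in soft_terms):
--                 soft_skills.append((skill, score))
--             else:
--                 tools.append((skill, score))
--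
--     def by_score(bucket):
--         return [s for s, _ in sorted(bucket, key=lambda x: x[1], reverse=True)]
--
--     return {'technical': by_score(technical),
--             'tools': by_score(tools),
--             'soft_skills': by_score(soft_skills)}
-- ===== Notes on version B (the rewrite author's own statement) =====
-- stated objective: alternative
-- what changed: B fuses scoring and categorizing into a single pass that drops each (skill, score) pair directly into its category bucket (same technical->soft->tools predicate order), then stable-sorts each of the three buckets by score descending, instead of A's build-all/global-sort/separate-categorize three-pass pipeline; exact because a stable sort keyed only on score commutes with partitioning.
import Mathlib
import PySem

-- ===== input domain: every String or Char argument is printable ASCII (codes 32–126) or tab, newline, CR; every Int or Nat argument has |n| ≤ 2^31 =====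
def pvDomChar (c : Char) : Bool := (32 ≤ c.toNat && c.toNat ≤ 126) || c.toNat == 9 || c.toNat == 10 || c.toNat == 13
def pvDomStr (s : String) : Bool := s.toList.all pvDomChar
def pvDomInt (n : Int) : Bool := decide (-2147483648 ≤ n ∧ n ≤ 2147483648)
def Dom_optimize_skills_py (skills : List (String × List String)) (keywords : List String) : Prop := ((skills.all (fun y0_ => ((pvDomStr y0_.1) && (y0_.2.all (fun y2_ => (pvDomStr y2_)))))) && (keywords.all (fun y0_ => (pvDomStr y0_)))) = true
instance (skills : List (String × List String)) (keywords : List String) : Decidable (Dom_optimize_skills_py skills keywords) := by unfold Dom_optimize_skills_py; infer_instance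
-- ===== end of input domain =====

-- B fuses scoring and categorizing into one pass over the skills, then stable-sorts each of the
-- three buckets by score descending (same result as A's single global sort + categorize pass;
-- same cost class, different decomposition — objective: alternative).

-- ===== PORT A =====
-- shared transliteration of the literal membership tests
-- 'any(term in skill_lower for term in ['python','sql','scala','java','spark'])' etc.
def pvTech (sl : String) : Bool :=
  ["python", "sql", "scala", "java", "spark"].any (fun term => PySem.Str.isIn term sl)
def pvSoft (sl : String) : Bool :=
  ["team", "communication", "agile", "collaboration"].any (fun term => PySem.Str.isIn term sl)

def optimize_skills_py (skills : List (String × List String)) (keywords : List String) :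
    List (String × List String) :=
  -- all_skills: for category, skill_list in skills.items(): all_skills.extend(skill_list)
  let all_skills := skills.foldl (fun acc cat => acc ++ cat.2) []
  -- score each skill
  let scored_skills := all_skills.foldl (fun acc skill =>
    let skill_lower := PySem.Str.lower skill
    let score := keywords.foldl (fun s kw =>
      if PySem.Str.isIn kw skill_lower || PySem.Str.isIn skill_lower kw then s + 1 else s) (0 : Int)
    acc ++ [(skill, score)]) []
  -- scored_skills.sort(key=lambda x: x[1], reverse=True)
  let sorted_skills := PySem.List.sorted scored_skills (fun x => x.2) true
  -- categorize into optimized = {'technical': [], 'tools': [], 'soft_skills': []}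
  let optimized := sorted_skills.foldl
    (fun (acc : List String × List String × List String) sp =>
      let skill_lower := PySem.Str.lower sp.1
      if pvTech skill_lower then (acc.1 ++ [sp.1], acc.2.1, acc.2.2)
      else if pvSoft skill_lower then (acc.1, acc.2.1, acc.2.2 ++ [sp.1])
      else (acc.1, acc.2.1 ++ [sp.1], acc.2.2)) ([], [], [])
  [("technical", optimized.1), ("tools", optimized.2.1), ("soft_skills", optimized.2.2)]

-- ===== PORT B =====
def optimize_skills_py_alt (skills : List (String × List String)) (keywords : List String) :
    List (String × List String) :=
  -- one pass: score each skill and append (skill, score) to its bucket (technical, soft_skills, tools)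
  let buckets := skills.foldl (fun acc cat =>
    cat.2.foldl
      (fun (acc : List (String × Int) × List (String × Int) × List (String × Int)) skill =>
        let sl := PySem.Str.lower skill
        let score : Int := keywords.countP (fun kw => PySem.Str.isIn kw sl || PySem.Str.isIn sl kw)
        if pvTech sl then (acc.1 ++ [(skill, score)], acc.2.1, acc.2.2)
        else if pvSoft sl then (acc.1, acc.2.1 ++ [(skill, score)], acc.2.2)
        else (acc.1, acc.2.1, acc.2.2 ++ [(skill, score)])) acc) (([], [], []))
  -- by_score: stable sort a bucket by score descending, keep the names
  let by_score := fun (bucket : List (String × Int)) =>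
    (PySem.List.sorted bucket (fun x => x.2) true).map (fun x => x.1)
  [("technical", by_score buckets.1), ("tools", by_score buckets.2.2),
   ("soft_skills", by_score buckets.2.1)]

-- ===== PRECONDITION & SPEC =====
def Spec_optimize_skills_py (skills : List (String × List String)) (keywords : List String) (out : List (String × List String)) : Prop := out = optimize_skills_py_alt skills keywords
instance (skills : List (String × List String)) (keywords : List String) (out : List (String × List String)) : Decidable (Spec_optimize_skills_py skills keywords out) := by unfold Spec_optimize_skills_py; infer_instance

-- ===== CLAIM (what is proved, stated in full; the proofs are below) =====
def Claim_equal_optimize_skills_py : Prop := ∀ (skills : List (String × List String)) (keywords : List String), Dom_optimize_skills_py skills keywords → Spec_optimize_skills_py skills keywords (optimize_skills_py skills keywords)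

-- ===== LEMMAS AND PROOFS =====

theorem insertBy_cons {α : Type} (b : α → α → Bool) (x y : α) (ys : List α) :
    PySem.List.insertBy b x (y :: ys) =
      if b x y then x :: y :: ys else y :: PySem.List.insertBy b x ys := rfl

-- insert a maximal element: it goes to the front
theorem insertBy_of_forall_before {α : Type} (before : α → α → Bool) (x : α) (l : List α)
    (h : ∀ z ∈ l, before x z = true) : PySem.List.insertBy before x l = x :: l := by
  cases l with
  | nil => rfl
  | cons y ys => rw [insertBy_cons, if_pos (h y (by simp))]

-- filter commutes with a single descending insertion (accumulator sorted descending)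
theorem filter_insertBy {α : Type} (key : α → Int) (p : α → Bool) (x : α) :
    ∀ (l : List α), l.Pairwise (fun a b => key b ≤ key a) →
      (PySem.List.insertBy (fun a b => decide (key b < key a)) x l).filter p =
        if p x then PySem.List.insertBy (fun a b => decide (key b < key a)) x (l.filter p)
        else l.filter p := by
  intro l
  induction l with
  | nil =>
    intro _
    show ([x].filter p) = _
    by_cases hx : p x <;> simp [List.filter, hx, PySem.List.insertBy]
  | cons y ys ih =>
    intro hp
    rw [List.pairwise_cons] at hp
    obtain ⟨h1, h2⟩ := hp
    by_cases hb : key y < key x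
    · have hall : ∀ z ∈ List.filter p (y :: ys),
          (fun a b => decide (key b < key a)) x z = true := by
        intro z hz
        have hz' := List.mem_of_mem_filter hz
        rcases List.mem_cons.mp hz' with h | h
        · rw [h]; simpa using hb
        · have := h1 z h; simp only [decide_eq_true_eq]; omega
      rw [insertBy_cons, if_pos (by simpa using hb),
        insertBy_of_forall_before (fun a b => decide (key b < key a)) x
          (List.filter p (y :: ys)) hall]
      by_cases hx : p x <;> simp [List.filter_cons, hx]
    · rw [insertBy_cons, if_neg (by simpa using hb)]
      simp only [List.filter_cons]
      rw [ih h2]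
      by_cases hx : p x <;> by_cases hy : p y <;>
        simp [hx, hy, insertBy_cons, hb]

-- descending insertion preserves the descending invariant
theorem pairwise_insertBy {α : Type} (key : α → Int) (x : α) :
    ∀ (l : List α), l.Pairwise (fun a b => key b ≤ key a) →
      (PySem.List.insertBy (fun a b => decide (key b < key a)) x l).Pairwise
        (fun a b => key b ≤ key a) := by
  intro l
  induction l with
  | nil => intro _; simp [PySem.List.insertBy]
  | cons y ys ih =>
    intro hp
    rw [List.pairwise_cons] at hp
    obtain ⟨h1, h2⟩ := hp
    rw [insertBy_cons]
    by_cases hb : key y < key x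
    · rw [if_pos (by simpa using hb), List.pairwise_cons]
      refine ⟨?_, List.pairwise_cons.mpr ⟨h1, h2⟩⟩
      intro z hz
      rcases List.mem_cons.mp hz with h | h
      · rw [h]; omega
      · have := h1 z h; omega
    · rw [if_neg (by simpa using hb), List.pairwise_cons]
      refine ⟨?_, ih h2⟩
      intro z hz
      rcases (PySem.List.mem_insertBy _ x z ys).mp hz with h | h
      · rw [h]; omega
      · exact h1 z h

theorem foldl_insertBy_filter {α : Type} (key : α → Int) (p : α → Bool) :
    ∀ (xs : List α) (acc : List α), acc.Pairwise (fun a b => key b ≤ key a) →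
      (xs.foldl (fun a x => PySem.List.insertBy (fun a b => decide (key b < key a)) x a) acc).filter p =
        (xs.filter p).foldl (fun a x => PySem.List.insertBy (fun a b => decide (key b < key a)) x a)
          (acc.filter p) := by
  intro xs
  induction xs with
  | nil => intro acc _; rfl
  | cons x xs ih =>
    intro acc hacc
    rw [List.foldl_cons, ih _ (pairwise_insertBy key x acc hacc),
      filter_insertBy key p x acc hacc, List.filter_cons]
    by_cases hx : p x <;> simp [hx]

-- filter commutes with Python's stable reverse sort keyed on score
theorem filter_sorted {α : Type} (key : α → Int) (p : α → Bool) (xs : List α) :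
    (PySem.List.sorted xs key true).filter p = PySem.List.sorted (xs.filter p) key true := by
  rw [PySem.List.sorted_rev_eq_foldl_insertBy, PySem.List.sorted_rev_eq_foldl_insertBy]
  exact foldl_insertBy_filter key p xs [] (by simp)

-- A's scoring loop builds the map with the countP score
theorem scoredA_eq (keywords : List String) (l : List String) (acc : List (String × Int)) :
    l.foldl (fun acc skill =>
      acc ++ [(skill, keywords.foldl (fun s kw =>
        if PySem.Str.isIn kw (PySem.Str.lower skill) ||
            PySem.Str.isIn (PySem.Str.lower skill) kw then s + 1 else s) (0 : Int))]) acc =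
    acc ++ l.map (fun skill => (skill,
      (keywords.countP (fun kw => PySem.Str.isIn kw (PySem.Str.lower skill) ||
        PySem.Str.isIn (PySem.Str.lower skill) kw) : Int))) := by
  rw [PySem.List.foldl_append_singleton_eq_map]
  congr 1
  refine List.map_congr_left (fun skill _ => ?_)
  rw [PySem.List.foldl_if_add_one]
  simp

-- A's categorize loop is three filters of the sorted list
theorem catA_eq (l : List (String × Int)) :
    ∀ (a b c : List String),
      l.foldl (fun (acc : List String × List String × List String) sp =>
        if pvTech (PySem.Str.lower sp.1) then (acc.1 ++ [sp.1], acc.2.1, acc.2.2)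
        else if pvSoft (PySem.Str.lower sp.1) then (acc.1, acc.2.1, acc.2.2 ++ [sp.1])
        else (acc.1, acc.2.1 ++ [sp.1], acc.2.2)) (a, b, c) =
      (a ++ (l.filter (fun sp => pvTech (PySem.Str.lower sp.1))).map Prod.fst,
       b ++ (l.filter (fun sp => !pvTech (PySem.Str.lower sp.1) &&
              !pvSoft (PySem.Str.lower sp.1))).map Prod.fst,
       c ++ (l.filter (fun sp => !pvTech (PySem.Str.lower sp.1) &&
              pvSoft (PySem.Str.lower sp.1))).map Prod.fst) := by
  induction l with
  | nil => intro a b c; simp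
  | cons sp l ih =>
    intro a b c
    rw [List.foldl_cons]
    by_cases ht : pvTech (PySem.Str.lower sp.1)
    · simp only [ht, if_true, List.filter_cons, Bool.not_true, Bool.false_and]
      rw [ih]
      simp
    · by_cases hs : pvSoft (PySem.Str.lower sp.1) <;>
        · simp only [ht, hs, if_true, if_false, Bool.false_eq_true, List.filter_cons,
            Bool.not_true, Bool.not_false, Bool.and_false, Bool.and_true]
          rw [ih]
          simp

-- B's fused pass is three filters of the skill stream, paired with their scores
theorem bucketB_eq (sc : String → Int) (l : List String) :
    ∀ (a b c : List (String × Int)),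
      l.foldl (fun (acc : List (String × Int) × List (String × Int) × List (String × Int)) skill =>
        if pvTech (PySem.Str.lower skill) then (acc.1 ++ [(skill, sc skill)], acc.2.1, acc.2.2)
        else if pvSoft (PySem.Str.lower skill) then (acc.1, acc.2.1 ++ [(skill, sc skill)], acc.2.2)
        else (acc.1, acc.2.1, acc.2.2 ++ [(skill, sc skill)])) (a, b, c) =
      (a ++ ((l.filter (fun s => pvTech (PySem.Str.lower s))).map (fun s => (s, sc s))),
       b ++ ((l.filter (fun s => !pvTech (PySem.Str.lower s) &&
            pvSoft (PySem.Str.lower s))).map (fun s => (s, sc s))),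
       c ++ ((l.filter (fun s => !pvTech (PySem.Str.lower s) &&
            !pvSoft (PySem.Str.lower s))).map (fun s => (s, sc s)))) := by
  induction l with
  | nil => intro a b c; simp
  | cons s l ih =>
    intro a b c
    rw [List.foldl_cons]
    by_cases ht : pvTech (PySem.Str.lower s)
    · simp only [ht, if_true, List.filter_cons, Bool.not_true, Bool.false_and]
      rw [ih]
      simp
    · by_cases hs : pvSoft (PySem.Str.lower s) <;>
        · simp only [ht, hs, if_true, if_false, Bool.false_eq_true, List.filter_cons,
            Bool.not_true, Bool.not_false, Bool.and_false, Bool.and_true]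
          rw [ih]
          simp

theorem ports_eq (skills : List (String × List String)) (keywords : List String) :
    optimize_skills_py skills keywords = optimize_skills_py_alt skills keywords := by
  unfold optimize_skills_py optimize_skills_py_alt
  simp only [scoredA_eq]
  simp only [PySem.List.foldl_append_eq_flatMap, ← List.foldl_flatMap, List.nil_append]
  simp only [catA_eq,
    bucketB_eq (fun skill => (keywords.countP (fun kw =>
      PySem.Str.isIn kw (PySem.Str.lower skill) ||
        PySem.Str.isIn (PySem.Str.lower skill) kw) : Int)),
    List.nil_append]
  simp only [filter_sorted, List.filter_map]
  rfl

-- ===== VERDICT (by name: the statement is the Claim_ definition above) =====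
theorem optimize_skills_py_spec : Claim_equal_optimize_skills_py := by
  intro skills keywords _
  unfold Spec_optimize_skills_py
  exact ports_eq skills keywords
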